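-- pv_equiv track=rewrite | github.com/anthropologenie/sacred-qa-audits | src/agents/kshana_agent.py | _synthesize_decision
-- ===== SOURCE A (Python) =====
-- from typing import Any, Dict, List, Tuple
--
-- def _synthesize_decision(
--     active_responses: Dict[str, str], query_lower: str
-- ) -> str:
--     """Synthesize decision-oriented query responses.
--
--     Args:
--         active_responses: Dictionary of agent responses
--         query_lower: Lowercased query
--
--     Returns:
--         Decision synthesis
--     """
--     # Extract key requirements from agent responses
--     requirements = []
--     considerations = []
--
--     # Parse Krudi (reality grounding)
--     if "krudi" in active_responses:
--         krudi_resp = active_responses["krudi"]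
--         if "staging test" in krudi_resp.lower():
--             requirements.append("staging validation")
--         if "rollback" in krudi_resp.lower():
--             requirements.append("rollback plan ready")
--         if "on-call" in krudi_resp.lower():
--             requirements.append("on-call coverage")
--         if "off-hours" in krudi_resp.lower():
--             requirements.append("deploy off-hours")
--
--     # Parse Parva (temporal consequences)
--     if "parva" in active_responses:
--         parva_resp = active_responses["parva"]
--         if "logged out" in parva_resp.lower():
--             requirements.append("support team briefed")
--         if "monitor" in parva_resp.lower():
--             considerations.append("Monitor closely for 24-48 hours")
--
--     # Parse Maya (scenario modeling)
--     if "maya" in active_responses: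
--         maya_resp = active_responses["maya"]
--         if "simulate" in maya_resp.lower() or "test" in maya_resp.lower():
--             requirements.append("scenario testing complete")
--
--     # Parse Shanti (balance)
--     if "shanti" in active_responses:
--         shanti_resp = active_responses["shanti"]
--         if "balance" in shanti_resp.lower():
--             considerations.append("Balance stakeholder needs")
--
--     # Build decision
--     if "deploy" in query_lower:
--         decision = "Yes, proceed with deployment"
--         if requirements:
--             decision += " after: " + ", ".join(
--                 f"({i+1}) {req}" for i, req in enumerate(requirements)
--             )
--         decision += "."
--         if considerations:
--             decision += " " + " ".join(considerations) + "."
--         return decision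
--
--     # Generic decision synthesis
--     if requirements:
--         return f"Proceed with caution. Prerequisites: {', '.join(requirements)}. {' '.join(considerations)}"
--     else:
--         return "Decision supported with standard precautions: testing, monitoring, rollback capability."
-- ===== SOURCE B (Python) =====
-- # B: data-major traversal: one pass over the dict items collecting matched (rank, is_req, msg)
-- # triples from a per-agent spec, then sort by rank and partition; vs A's fixed rule-order if-chains.
-- _SPECS = {
--     "krudi": ((0, ("staging test",), True, "staging validation"),
--               (1, ("rollback",), True, "rollback plan ready"),
--               (2, ("on-call",), True, "on-call coverage"),
--               (3, ("off-hours",), True, "deploy off-hours")),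
--     "parva": ((4, ("logged out",), True, "support team briefed"),
--               (5, ("monitor",), False, "Monitor closely for 24-48 hours")),
--     "maya": ((6, ("simulate", "test"), True, "scenario testing complete"),),
--     "shanti": ((7, ("balance",), False, "Balance stakeholder needs"),),
-- }
--
--
-- def _synthesize_decision(active_responses, query_lower):
--     matched = []
--     for agent, resp in active_responses.items():
--         low = resp.lower()
--         matched += [(rank, is_req, msg)
--                     for rank, trigs, is_req, msg in _SPECS.get(agent, ())
--                     if any(t in low for t in trigs)]
--     matched.sort(key=lambda m: m[0])
--     requirements = [msg for _, is_req, msg in matched if is_req]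
--     considerations = [msg for _, is_req, msg in matched if not is_req]
--
--     if "deploy" in query_lower:
--         decision = "Yes, proceed with deployment"
--         if requirements:
--             decision += " after: " + ", ".join(
--                 f"({i+1}) {req}" for i, req in enumerate(requirements)
--             )
--         decision += "."
--         if considerations:
--             decision += " " + " ".join(considerations) + "."
--         return decision
--
--     if requirements:
--         return f"Proceed with caution. Prerequisites: {', '.join(requirements)}. {' '.join(considerations)}"
--     return "Decision supported with standard precautions: testing, monitoring, rollback capability."
-- ===== Notes on version B (the rewrite author's own statement) =====
-- stated objective: alternative
-- what changed: B traverses the data instead of the rules: one pass over the dict items collects matched (rank, is_req, msg) triples from a per-agent spec, then sorts them by rank and partitions into requirements/considerations, where A runs a fixed sequence of per-agent if-chains; Pre_ only excludes association lists with duplicate agent keys, which are an ambiguous encoding of a Python dict (not expressible as a dict input at all).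
import Mathlib
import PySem

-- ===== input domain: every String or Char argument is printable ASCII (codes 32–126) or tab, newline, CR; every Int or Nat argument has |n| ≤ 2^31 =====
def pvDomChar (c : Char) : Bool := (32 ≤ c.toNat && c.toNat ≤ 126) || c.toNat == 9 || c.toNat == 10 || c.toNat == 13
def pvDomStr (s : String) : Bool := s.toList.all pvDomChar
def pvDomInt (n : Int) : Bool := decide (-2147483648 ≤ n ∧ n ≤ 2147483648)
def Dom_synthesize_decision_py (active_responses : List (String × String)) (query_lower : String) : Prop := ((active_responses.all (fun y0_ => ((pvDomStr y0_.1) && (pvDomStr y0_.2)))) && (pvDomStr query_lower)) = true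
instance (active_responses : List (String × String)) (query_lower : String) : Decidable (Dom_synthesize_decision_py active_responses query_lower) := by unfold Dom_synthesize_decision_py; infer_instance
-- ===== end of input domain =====

-- B traverses the DATA (one pass over the dict items) collecting matched (rank, is_req, msg)
-- triples from a per-agent spec, then sorts by rank and partitions, instead of A's fixed
-- rule-order if-chains; same cost, different traversal.

-- dict lookup: 'k in d' / 'd[k]' on the association list (first match)
def pvLookup (d : List (String × String)) (k : String) : Option String :=
  (d.find? (fun p => p.1 == k)).map (·.2)

-- ===== PORT A =====
def synthesize_decision_py (active_responses : List (String × String)) (query_lower : String) : String :=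
  let requirements : List String := []
  let considerations : List String := []
  -- Parse Krudi
  let requirements :=
    match pvLookup active_responses "krudi" with
    | some krudi_resp =>
        let requirements := if PySem.Str.isIn "staging test" (PySem.Str.lower krudi_resp) then requirements ++ ["staging validation"] else requirements
        let requirements := if PySem.Str.isIn "rollback" (PySem.Str.lower krudi_resp) then requirements ++ ["rollback plan ready"] else requirements
        let requirements := if PySem.Str.isIn "on-call" (PySem.Str.lower krudi_resp) then requirements ++ ["on-call coverage"] else requirements
        if PySem.Str.isIn "off-hours" (PySem.Str.lower krudi_resp) then requirements ++ ["deploy off-hours"] else requirements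
    | none => requirements
  -- Parse Parva
  let (requirements, considerations) :=
    match pvLookup active_responses "parva" with
    | some parva_resp =>
        let requirements := if PySem.Str.isIn "logged out" (PySem.Str.lower parva_resp) then requirements ++ ["support team briefed"] else requirements
        let considerations := if PySem.Str.isIn "monitor" (PySem.Str.lower parva_resp) then considerations ++ ["Monitor closely for 24-48 hours"] else considerations
        (requirements, considerations)
    | none => (requirements, considerations)
  -- Parse Maya
  let requirements :=
    match pvLookup active_responses "maya" with
    | some maya_resp =>
        if PySem.Str.isIn "simulate" (PySem.Str.lower maya_resp) || PySem.Str.isIn "test" (PySem.Str.lower maya_resp) then requirements ++ ["scenario testing complete"] else requirements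
    | none => requirements
  -- Parse Shanti
  let considerations :=
    match pvLookup active_responses "shanti" with
    | some shanti_resp =>
        if PySem.Str.isIn "balance" (PySem.Str.lower shanti_resp) then considerations ++ ["Balance stakeholder needs"] else considerations
    | none => considerations
  -- Build decision
  if PySem.Str.isIn "deploy" query_lower then
    let decision := "Yes, proceed with deployment"
    let decision :=
      if requirements ≠ [] then
        decision ++ " after: " ++ PySem.Str.join ", " ((PySem.List.enumerate requirements 0).map (fun p => "(" ++ PySem.Int.toStr (p.1 + 1) ++ ") " ++ p.2))
      else decision
    let decision := decision ++ "."
    if considerations ≠ [] then decision ++ " " ++ PySem.Str.join " " considerations ++ "." else decision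
  else
    if requirements ≠ [] then
      "Proceed with caution. Prerequisites: " ++ PySem.Str.join ", " requirements ++ ". " ++ PySem.Str.join " " considerations
    else
      "Decision supported with standard precautions: testing, monitoring, rollback capability."

-- ===== PORT B =====
-- _SPECS: per-agent list of (rank, trigger substrings, is_requirement, message)
def pvSpecs : List (String × List (Int × List String × Bool × String)) :=
  [ ("krudi", [((0 : Int), ["staging test"], true, "staging validation"),
               (1, ["rollback"], true, "rollback plan ready"),
               (2, ["on-call"], true, "on-call coverage"),
               (3, ["off-hours"], true, "deploy off-hours")]),
    ("parva", [(4, ["logged out"], true, "support team briefed"),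
               (5, ["monitor"], false, "Monitor closely for 24-48 hours")]),
    ("maya",  [(6, ["simulate", "test"], true, "scenario testing complete")]),
    ("shanti", [(7, ["balance"], false, "Balance stakeholder needs")]) ]

-- _SPECS.get(agent, ())
def pvSpecGet (agent : String) : List (Int × List String × Bool × String) :=
  ((pvSpecs.find? (fun p => p.1 == agent)).map (·.2)).getD []

-- the (rank, is_req, msg) projection of a spec row
def pvProj (r : Int × List String × Bool × String) : Int × Bool × String := (r.1, r.2.2.1, r.2.2.2)

-- the list comprehension for one dict item: matched spec rows of this agent
def pvAgentMatches (agent resp : String) : List (Int × Bool × String) :=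
  let low := PySem.Str.lower resp
  ((pvSpecGet agent).filter (fun r => r.2.1.any (fun t => PySem.Str.isIn t low))).map pvProj

def synthesize_decision_py_alt (active_responses : List (String × String)) (query_lower : String) : String :=
  let matched := active_responses.foldl (fun acc p => acc ++ pvAgentMatches p.1 p.2) []
  let matched := PySem.List.sorted matched (fun m => m.1)
  let requirements := (matched.filter (fun m => m.2.1)).map (fun m => m.2.2)
  let considerations := (matched.filter (fun m => !m.2.1)).map (fun m => m.2.2)
  if PySem.Str.isIn "deploy" query_lower then
    let decision := "Yes, proceed with deployment"
    let decision :=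
      if requirements ≠ [] then
        decision ++ " after: " ++ PySem.Str.join ", " ((PySem.List.enumerate requirements 0).map (fun p => "(" ++ PySem.Int.toStr (p.1 + 1) ++ ") " ++ p.2))
      else decision
    let decision := decision ++ "."
    if considerations ≠ [] then decision ++ " " ++ PySem.Str.join " " considerations ++ "." else decision
  else
    if requirements ≠ [] then
      "Proceed with caution. Prerequisites: " ++ PySem.Str.join ", " requirements ++ ". " ++ PySem.Str.join " " considerations
    else
      "Decision supported with standard precautions: testing, monitoring, rollback capability."

-- ===== PRECONDITION & SPEC =====
-- Pre_ excludes association lists with duplicate agent keys: those are an ambiguous encoding of a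
-- Python dict (first-match lookup, as A's parsing uses, and items() iteration, as B's pass uses,
-- disagree on them), so neither behaviour is the dict's.
def Pre_synthesize_decision_py (active_responses : List (String × String)) (query_lower : String) : Prop :=
  (active_responses.map Prod.fst).Nodup
instance (active_responses : List (String × String)) (query_lower : String) : Decidable (Pre_synthesize_decision_py active_responses query_lower) := by unfold Pre_synthesize_decision_py; infer_instance

def pvWitness_synthesize_decision_py : (List (String × String)) × String :=
  ([("krudi", "rollback"), ("maya", "run a test")], "deploy now")

def Spec_synthesize_decision_py (active_responses : List (String × String)) (query_lower : String) (out : String) : Prop := out = synthesize_decision_py_alt active_responses query_lower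
instance (active_responses : List (String × String)) (query_lower : String) (out : String) : Decidable (Spec_synthesize_decision_py active_responses query_lower out) := by unfold Spec_synthesize_decision_py; infer_instance

-- ===== CLAIM (what is proved, stated in full; the proofs are below) =====
def Claim_equal_synthesize_decision_py : Prop := ∀ (active_responses : List (String × String)) (query_lower : String), Dom_synthesize_decision_py active_responses query_lower → Pre_synthesize_decision_py active_responses query_lower → Spec_synthesize_decision_py active_responses query_lower (synthesize_decision_py active_responses query_lower)

-- ===== LEMMAS AND PROOFS =====

-- the matches of one agent given its (optional) response
def pvOptMatches (agent : String) (o : Option String) : List (Int × Bool × String) :=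
  match o with
  | some r => pvAgentMatches agent r
  | none => []

-- canonical rank-ordered match list: the four agents' blocks in spec order
def pvC (ar : List (String × String)) : List (Int × Bool × String) :=
  pvOptMatches "krudi" (pvLookup ar "krudi") ++
    (pvOptMatches "parva" (pvLookup ar "parva") ++
      (pvOptMatches "maya" (pvLookup ar "maya") ++ pvOptMatches "shanti" (pvLookup ar "shanti")))

def pvFull : List (Int × Bool × String) :=
  (pvSpecGet "krudi").map pvProj ++
    ((pvSpecGet "parva").map pvProj ++
      ((pvSpecGet "maya").map pvProj ++ (pvSpecGet "shanti").map pvProj))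

lemma pv_lookup_cons (k v : String) (rest : List (String × String)) (a : String) :
    pvLookup ((k, v) :: rest) a = if k = a then some v else pvLookup rest a := by
  by_cases h : k = a <;> simp [pvLookup, h]

lemma pv_lookup_none (rest : List (String × String)) (k : String)
    (h : k ∉ rest.map Prod.fst) : pvLookup rest k = none := by
  simp only [pvLookup, Option.map_eq_none_iff, List.find?_eq_none, beq_iff_eq]
  intro p hp he
  exact h (he ▸ List.mem_map_of_mem hp)

lemma pv_matches_other (k v : String) (h1 : k ≠ "krudi") (h2 : k ≠ "parva")
    (h3 : k ≠ "maya") (h4 : k ≠ "shanti") : pvAgentMatches k v = [] := by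
  simp [pvAgentMatches, pvSpecGet, pvSpecs, beq_iff_eq,
    Ne.symm h1, Ne.symm h2, Ne.symm h3, Ne.symm h4]

-- one pass over the items is a permutation of the canonical blocks (distinct keys)
lemma pv_perm (ar : List (String × String)) (h : (ar.map Prod.fst).Nodup) :
    (ar.flatMap (fun p => pvAgentMatches p.1 p.2)).Perm (pvC ar) := by
  induction ar with
  | nil => simp [pvC, pvLookup, pvOptMatches]
  | cons p rest ih =>
      obtain ⟨k, v⟩ := p
      simp only [List.map_cons, List.nodup_cons] at h
      obtain ⟨hk, hrest⟩ := h
      have hper := List.perm_iff_count.mp (ih hrest)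
      rw [List.perm_iff_count]
      intro a
      have hcnt := hper a
      by_cases e1 : k = "krudi"
      · subst e1
        simp [pvC, pv_lookup_cons, pvOptMatches, pv_lookup_none rest _ hk,
          List.count_append, List.flatMap_cons] at hcnt ⊢
        omega
      · by_cases e2 : k = "parva"
        · subst e2
          simp [pvC, pv_lookup_cons, pvOptMatches, pv_lookup_none rest _ hk,
            List.count_append, List.flatMap_cons] at hcnt ⊢
          omega
        · by_cases e3 : k = "maya"
          · subst e3
            simp [pvC, pv_lookup_cons, pvOptMatches, pv_lookup_none rest _ hk,
              List.count_append, List.flatMap_cons] at hcnt ⊢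
            omega
          · by_cases e4 : k = "shanti"
            · subst e4
              simp [pvC, pv_lookup_cons, pvOptMatches, pv_lookup_none rest _ hk,
                List.count_append, List.flatMap_cons] at hcnt ⊢
              omega
            · simp [pvC, pv_lookup_cons, pvOptMatches, e1, e2, e3, e4,
                pv_matches_other k v e1 e2 e3 e4, List.count_append, List.flatMap_cons] at hcnt ⊢
              omega

lemma pv_get_k : pvSpecGet "krudi" =
    [((0 : Int), ["staging test"], true, "staging validation"),
     (1, ["rollback"], true, "rollback plan ready"),
     (2, ["on-call"], true, "on-call coverage"),
     (3, ["off-hours"], true, "deploy off-hours")] := by rfl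

lemma pv_get_p : pvSpecGet "parva" =
    [((4 : Int), ["logged out"], true, "support team briefed"),
     (5, ["monitor"], false, "Monitor closely for 24-48 hours")] := by rfl

lemma pv_get_m : pvSpecGet "maya" =
    [((6 : Int), ["simulate", "test"], true, "scenario testing complete")] := by rfl

lemma pv_get_s : pvSpecGet "shanti" =
    [((7 : Int), ["balance"], false, "Balance stakeholder needs")] := by rfl

lemma pv_block_sub (agent : String) (o : Option String) :
    List.Sublist (pvOptMatches agent o) ((pvSpecGet agent).map pvProj) := by
  cases o with
  | none => exact List.nil_sublist _
  | some r => exact List.filter_sublist.map pvProj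

lemma pvC_pairwise (ar : List (String × String)) :
    (pvC ar).Pairwise (fun a b => a.1 < b.1) := by
  have hsub : List.Sublist (pvC ar) pvFull :=
    List.Sublist.append (pv_block_sub _ _)
      (List.Sublist.append (pv_block_sub _ _)
        (List.Sublist.append (pv_block_sub _ _) (pv_block_sub _ _)))
  exact List.Pairwise.sublist hsub (by decide)

-- per-agent block expansions into ite-singletons
lemma pv_k_eq (r : String) : pvAgentMatches "krudi" r =
    (if PySem.Str.isIn "staging test" (PySem.Str.lower r) then [((0 : Int), true, "staging validation")] else []) ++
      ((if PySem.Str.isIn "rollback" (PySem.Str.lower r) then [((1 : Int), true, "rollback plan ready")] else []) ++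
        ((if PySem.Str.isIn "on-call" (PySem.Str.lower r) then [((2 : Int), true, "on-call coverage")] else []) ++
          (if PySem.Str.isIn "off-hours" (PySem.Str.lower r) then [((3 : Int), true, "deploy off-hours")] else []))) := by
  simp only [pvAgentMatches, pv_get_k, List.filter_cons,
    List.filter_nil, List.any_cons, List.any_nil, Bool.or_false]
  generalize PySem.Str.isIn "staging test" (PySem.Str.lower r) = c1
  generalize PySem.Str.isIn "rollback" (PySem.Str.lower r) = c2
  generalize PySem.Str.isIn "on-call" (PySem.Str.lower r) = c3
  generalize PySem.Str.isIn "off-hours" (PySem.Str.lower r) = c4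
  cases c1 <;> cases c2 <;> cases c3 <;> cases c4 <;> rfl

lemma pv_p_eq (r : String) : pvAgentMatches "parva" r =
    (if PySem.Str.isIn "logged out" (PySem.Str.lower r) then [((4 : Int), true, "support team briefed")] else []) ++
      (if PySem.Str.isIn "monitor" (PySem.Str.lower r) then [((5 : Int), false, "Monitor closely for 24-48 hours")] else []) := by
  simp only [pvAgentMatches, pv_get_p, List.filter_cons,
    List.filter_nil, List.any_cons, List.any_nil, Bool.or_false]
  generalize PySem.Str.isIn "logged out" (PySem.Str.lower r) = c1
  generalize PySem.Str.isIn "monitor" (PySem.Str.lower r) = c2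
  cases c1 <;> cases c2 <;> rfl

lemma pv_m_eq (r : String) : pvAgentMatches "maya" r =
    (if PySem.Str.isIn "simulate" (PySem.Str.lower r) || PySem.Str.isIn "test" (PySem.Str.lower r) then [((6 : Int), true, "scenario testing complete")] else []) := by
  simp only [pvAgentMatches, pv_get_m, List.filter_cons,
    List.filter_nil, List.any_cons, List.any_nil, Bool.or_false]
  generalize PySem.Str.isIn "simulate" (PySem.Str.lower r) = c1
  generalize PySem.Str.isIn "test" (PySem.Str.lower r) = c2
  cases c1 <;> cases c2 <;> rfl

lemma pv_s_eq (r : String) : pvAgentMatches "shanti" r =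
    (if PySem.Str.isIn "balance" (PySem.Str.lower r) then [((7 : Int), false, "Balance stakeholder needs")] else []) := by
  simp only [pvAgentMatches, pv_get_s, List.filter_cons,
    List.filter_nil, List.any_cons, List.any_nil, Bool.or_false]
  generalize PySem.Str.isIn "balance" (PySem.Str.lower r) = c1
  cases c1 <;> rfl

-- A's append-to-end ite, as a concatenation with an ite-singleton
lemma pv_ite_app (c : Prop) [Decidable c] (x : List String) (m : String) :
    (if c then x ++ [m] else x) = x ++ (if c then [m] else []) := by
  split_ifs <;> simp

-- (filter ∘ map) through an ite-singleton block, for each (is_req, target) combination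
lemma pv_fm_req_true (c : Prop) [Decidable c] (r : Int) (m : String) :
    (((if c then [(r, true, m)] else []) : List (Int × Bool × String)).filter (fun x => x.2.1)).map (fun x => x.2.2) = if c then [m] else [] := by
  split_ifs <;> rfl

lemma pv_fm_req_false (c : Prop) [Decidable c] (r : Int) (m : String) :
    (((if c then [(r, false, m)] else []) : List (Int × Bool × String)).filter (fun x => x.2.1)).map (fun x => x.2.2) = [] := by
  split_ifs <;> rfl

lemma pv_fm_cons_true (c : Prop) [Decidable c] (r : Int) (m : String) :
    (((if c then [(r, true, m)] else []) : List (Int × Bool × String)).filter (fun x => !x.2.1)).map (fun x => x.2.2) = [] := by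
  split_ifs <;> rfl

lemma pv_fm_cons_false (c : Prop) [Decidable c] (r : Int) (m : String) :
    (((if c then [(r, false, m)] else []) : List (Int × Bool × String)).filter (fun x => !x.2.1)).map (fun x => x.2.2) = if c then [m] else [] := by
  split_ifs <;> rfl

set_option maxHeartbeats 1600000 in
lemma pv_main (ar : List (String × String)) (q : String)
    (hpre : (ar.map Prod.fst).Nodup) :
    synthesize_decision_py ar q = synthesize_decision_py_alt ar q := by
  have hflat : ar.foldl (fun acc p => acc ++ pvAgentMatches p.1 p.2) [] =
      ar.flatMap (fun p => pvAgentMatches p.1 p.2) := by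
    simpa using PySem.List.foldl_append_eq_flatMap (fun p => pvAgentMatches p.1 p.2) ar []
  have hsort : PySem.List.sorted (ar.flatMap (fun p => pvAgentMatches p.1 p.2)) (fun m => m.1) = pvC ar :=
    PySem.List.sorted_eq_of_perm_of_pairwise_lt _ _ _ (pv_perm ar hpre).symm (pvC_pairwise ar)
  obtain ⟨o1, h1⟩ : ∃ o, pvLookup ar "krudi" = o := ⟨_, rfl⟩
  obtain ⟨o2, h2⟩ : ∃ o, pvLookup ar "parva" = o := ⟨_, rfl⟩
  obtain ⟨o3, h3⟩ : ∃ o, pvLookup ar "maya" = o := ⟨_, rfl⟩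
  obtain ⟨o4, h4⟩ : ∃ o, pvLookup ar "shanti" = o := ⟨_, rfl⟩
  unfold synthesize_decision_py synthesize_decision_py_alt
  simp only [hflat, hsort, pvC, h1, h2, h3, h4]
  cases o1 <;> cases o2 <;> cases o3 <;> cases o4 <;>
    (simp only [pvOptMatches, pv_ite_app];
     simp only [pv_k_eq, pv_p_eq, pv_m_eq, pv_s_eq,
       List.filter_append, List.map_append, List.filter_nil, List.map_nil,
       pv_fm_req_true, pv_fm_req_false, pv_fm_cons_true, pv_fm_cons_false,
       List.append_nil, List.nil_append, List.append_assoc])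

-- ===== VERDICT (by name: the statement is the Claim_ definition above) =====
theorem synthesize_decision_py_spec : Claim_equal_synthesize_decision_py := by
  intro ar q _ hpre
  show synthesize_decision_py ar q = synthesize_decision_py_alt ar q
  exact pv_main ar q hpre
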